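-- pv_equiv track=rewrite | github.com/ames0k0/not_deleted_code | AdventOfCode/2021/Python/13/transparent_origami_1.py | transparent_y
-- ===== SOURCE A (Python) =====
-- def transparent_y(coords, fold_y):
--   up = []
--   down = []
--   for (x, y) in coords:
--     if (y < fold_y):
--       up.append((x, y))
--     else:
--       down.append((x, y))
--   # sorted by y and reversed ?
--   up = sorted(up, key=lambda x: x[1])
--   down = sorted(down, key=lambda x: x[1])
--   max_y = up[-1][1]
--   for (x, y) in down:
--     y = abs(y - max_y)
--     if (not x) and (not y):
--       continue
--     up.append((x, y))
--   return up
-- ===== SOURCE B (Python) =====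
-- def transparent_y(coords, fold_y):
--   # One stable sort of all points by y, split at the fold line by scanning for
--   # the first y >= fold_y; reflection simplifies to y - max_y (always > 0), so
--   # the abs() and the (0,0)-skip of the original are unnecessary.
--   pts = sorted(coords, key=lambda p: p[1])
--   i = 0
--   while i < len(pts) and pts[i][1] < fold_y:
--     i += 1
--   up = pts[:i]
--   down = pts[i:]
--   max_y = up[-1][1]
--   return up + [(x, y - max_y) for (x, y) in down]
-- ===== Notes on version B (the rewrite author's own statement) =====
-- stated objective: simpler
-- what changed: B sorts all points once by y and splits at the fold line with a single scan (instead of A's partition-then-two-sorts), and computes the reflection as a plain y - max_y comprehension, dropping A's abs() and (0,0)-skip which are unreachable because every down y exceeds max_y.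
import Mathlib
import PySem

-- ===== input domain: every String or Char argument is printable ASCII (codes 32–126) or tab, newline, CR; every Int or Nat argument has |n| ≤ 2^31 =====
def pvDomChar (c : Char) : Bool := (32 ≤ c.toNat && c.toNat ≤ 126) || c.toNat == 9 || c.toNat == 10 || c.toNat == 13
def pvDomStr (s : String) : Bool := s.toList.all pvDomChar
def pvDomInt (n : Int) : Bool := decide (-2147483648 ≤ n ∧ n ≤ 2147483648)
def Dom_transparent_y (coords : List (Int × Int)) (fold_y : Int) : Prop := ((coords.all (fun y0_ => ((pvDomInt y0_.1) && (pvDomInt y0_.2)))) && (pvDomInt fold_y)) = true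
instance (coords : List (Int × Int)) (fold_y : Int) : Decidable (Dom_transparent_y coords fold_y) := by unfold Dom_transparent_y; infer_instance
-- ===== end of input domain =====

-- B sorts once and splits at the fold line by a scan, then reflects with a plain
-- map (the abs() and (0,0)-skip of A are unreachable); objective: simpler.

-- ===== PORT A =====
def transparent_y (coords : List (Int × Int)) (fold_y : Int) : List (Int × Int) :=
  let ud := coords.foldl
    (fun (s : List (Int × Int) × List (Int × Int)) p =>
      if p.2 < fold_y then (s.1 ++ [p], s.2) else (s.1, s.2 ++ [p])) ([], [])
  let up := PySem.List.sorted ud.1 (fun p => p.2)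
  let down := PySem.List.sorted ud.2 (fun p => p.2)
  match PySem.List.pyGet? up (-1) with
  | none => []  -- up[-1] raises IndexError in Python (up empty); excluded by Pre_
  | some m =>
      down.foldl (fun acc p =>
        let y := |p.2 - m.2|
        if p.1 = 0 ∧ y = 0 then acc else acc ++ [(p.1, y)]) up

-- ===== PORT B =====
-- the while-scan of Source B for the first index with y >= fold_y
def pvCountUp (fold_y : Int) : List (Int × Int) → Nat
  | [] => 0
  | p :: t => if p.2 < fold_y then pvCountUp fold_y t + 1 else 0

def transparent_y_alt (coords : List (Int × Int)) (fold_y : Int) : List (Int × Int) :=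
  let pts := PySem.List.sorted coords (fun p => p.2)
  let i := pvCountUp fold_y pts
  let up := PySem.List.slice pts none (some (i : Int))    -- pts[:i]
  let down := PySem.List.slice pts (some (i : Int)) none  -- pts[i:]
  match PySem.List.pyGet? up (-1) with
  | none => []  -- up[-1] raises IndexError in Python (up empty); excluded by Pre_
  | some m => up ++ down.map (fun p => (p.1, p.2 - m.2))

-- ===== PRECONDITION & SPEC =====
-- Both programs raise IndexError (up[-1] on an empty up) iff no point lies above the fold.
def Pre_transparent_y (coords : List (Int × Int)) (fold_y : Int) : Prop :=
  ∃ p ∈ coords, p.2 < fold_y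
instance (coords : List (Int × Int)) (fold_y : Int) : Decidable (Pre_transparent_y coords fold_y) := by
  unfold Pre_transparent_y; infer_instance
def pvWitness_transparent_y : (List (Int × Int)) × Int := ([(2, 0), (1, 3)], 2)

def Spec_transparent_y (coords : List (Int × Int)) (fold_y : Int) (out : List (Int × Int)) : Prop := out = transparent_y_alt coords fold_y
instance (coords : List (Int × Int)) (fold_y : Int) (out : List (Int × Int)) : Decidable (Spec_transparent_y coords fold_y out) := by unfold Spec_transparent_y; infer_instance

-- ===== CLAIM (what is proved, stated in full; the proofs are below) =====
def Claim_equal_transparent_y : Prop := ∀ (coords : List (Int × Int)) (fold_y : Int), Dom_transparent_y coords fold_y → Pre_transparent_y coords fold_y → Spec_transparent_y coords fold_y (transparent_y coords fold_y)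

-- ===== LEMMAS AND PROOFS =====

theorem pv_partition_foldl (fold_y : Int) (coords a b : List (Int × Int)) :
    coords.foldl
      (fun (s : List (Int × Int) × List (Int × Int)) p =>
        if p.2 < fold_y then (s.1 ++ [p], s.2) else (s.1, s.2 ++ [p])) (a, b)
    = (a ++ coords.filter (fun p => decide (p.2 < fold_y)),
       b ++ coords.filter (fun p => !decide (p.2 < fold_y))) := by
  induction coords generalizing a b with
  | nil => simp
  | cons p t ih =>
    by_cases h : p.2 < fold_y <;> simp [h, ih]

theorem pv_insertBy_append_left {α : Type} (before : α → α → Bool) (a : α) (u d : List α)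
    (h : ∀ y ∈ d, before a y = true) :
    PySem.List.insertBy before a (u ++ d) = PySem.List.insertBy before a u ++ d := by
  induction u with
  | nil =>
    cases d with
    | nil => simp [PySem.List.insertBy]
    | cons y ys => simp [PySem.List.insertBy, h y (by simp)]
  | cons z u' ih =>
    by_cases hz : before a z = true <;> simp [PySem.List.insertBy, hz, ih]

theorem pv_insertBy_append_right {α : Type} (before : α → α → Bool) (a : α) (u d : List α)
    (h : ∀ y ∈ u, before a y = false) :
    PySem.List.insertBy before a (u ++ d) = u ++ PySem.List.insertBy before a d := by
  induction u with
  | nil => simp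
  | cons z u' ih =>
    have hz := h z (by simp)
    simp [PySem.List.insertBy, hz]
    exact ih (fun y hy => h y (by simp [hy]))

theorem pv_sorted_append_singleton {α κ : Type} [LT κ] [DecidableLT κ]
    (l : List α) (a : α) (key : α → κ) :
    PySem.List.sorted (l ++ [a]) key
    = PySem.List.insertBy (fun x y => decide (key x < key y)) a (PySem.List.sorted l key) := by
  rw [PySem.List.sorted_eq_foldl_insertBy, PySem.List.sorted_eq_foldl_insertBy, List.foldl_append]
  rfl

theorem pv_sorted_split (c : Int) (xs : List (Int × Int)) :
    PySem.List.sorted xs (fun p => p.2)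
    = PySem.List.sorted (xs.filter (fun p => decide (p.2 < c))) (fun p => p.2)
      ++ PySem.List.sorted (xs.filter (fun p => !decide (p.2 < c))) (fun p => p.2) := by
  induction xs using List.reverseRecOn with
  | nil => simp [PySem.List.sorted_eq_nil_iff]
  | append_singleton l a ih =>
    rw [pv_sorted_append_singleton, ih]
    by_cases h : a.2 < c
    · rw [pv_insertBy_append_left _ a _ _ (by
        intro y hy
        have : y ∈ l.filter (fun p => !decide (p.2 < c)) :=
          (PySem.List.mem_sorted _ _ _ _).1 hy
        have hyc : ¬ y.2 < c := by
          have := List.of_mem_filter this; simpa using this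
        simp; omega)]
      have hf1 : (l ++ [a]).filter (fun p => decide (p.2 < c))
          = l.filter (fun p => decide (p.2 < c)) ++ [a] := by simp [List.filter_append, h]
      have hf2 : (l ++ [a]).filter (fun p => !decide (p.2 < c))
          = l.filter (fun p => !decide (p.2 < c)) := by simp [List.filter_append, h]
      rw [hf1, hf2, pv_sorted_append_singleton]
    · rw [pv_insertBy_append_right _ a _ _ (by
        intro y hy
        have : y ∈ l.filter (fun p => decide (p.2 < c)) :=
          (PySem.List.mem_sorted _ _ _ _).1 hy
        have hyc : y.2 < c := by
          have := List.of_mem_filter this; simpa using this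
        simp; omega)]
      have hf1 : (l ++ [a]).filter (fun p => decide (p.2 < c))
          = l.filter (fun p => decide (p.2 < c)) := by simp [List.filter_append, h]
      have hf2 : (l ++ [a]).filter (fun p => !decide (p.2 < c))
          = l.filter (fun p => !decide (p.2 < c)) ++ [a] := by simp [List.filter_append, h]
      rw [hf1, hf2, pv_sorted_append_singleton]

theorem pv_countUp_append (c : Int) (u d : List (Int × Int))
    (hu : ∀ y ∈ u, y.2 < c) (hd : ∀ y ∈ d, ¬ y.2 < c) :
    pvCountUp c (u ++ d) = u.length := by
  induction u with
  | nil =>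
    cases d with
    | nil => rfl
    | cons y ys => simp [pvCountUp, hd y (by simp)]
  | cons z u' ih =>
    simp [pvCountUp, hu z (by simp)]
    exact ih (fun y hy => hu y (by simp [hy]))

-- ===== VERDICT (by name: the statement is the Claim_ definition above) =====
theorem transparent_y_spec : Claim_equal_transparent_y := by
  intro coords fold_y _dom hpre
  unfold Spec_transparent_y transparent_y transparent_y_alt
  simp only [pv_partition_foldl fold_y coords [] [], List.nil_append]
  set U := PySem.List.sorted (coords.filter (fun p => decide (p.2 < fold_y))) (fun p => p.2) with hU
  set D := PySem.List.sorted (coords.filter (fun p => !decide (p.2 < fold_y))) (fun p => p.2) with hD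
  have hUmem : ∀ y ∈ U, y.2 < fold_y := by
    intro y hy
    have : y ∈ coords.filter (fun p => decide (p.2 < fold_y)) :=
      (PySem.List.mem_sorted _ _ _ _).1 hy
    have := List.of_mem_filter this; simpa using this
  have hDmem : ∀ y ∈ D, ¬ y.2 < fold_y := by
    intro y hy
    have : y ∈ coords.filter (fun p => !decide (p.2 < fold_y)) :=
      (PySem.List.mem_sorted _ _ _ _).1 hy
    have := List.of_mem_filter this; simpa using this
  have hsplit : PySem.List.sorted coords (fun p => p.2) = U ++ D := pv_sorted_split fold_y coords
  have hcount : pvCountUp fold_y (PySem.List.sorted coords (fun p => p.2)) = U.length := by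
    rw [hsplit]; exact pv_countUp_append fold_y U D hUmem hDmem
  have hup : PySem.List.slice (PySem.List.sorted coords (fun p => p.2)) none
      (some ((pvCountUp fold_y (PySem.List.sorted coords (fun p => p.2)) : Nat) : Int)) = U := by
    rw [hcount, PySem.List.slice_to_natCast, hsplit, List.take_left]
  have hdown : PySem.List.slice (PySem.List.sorted coords (fun p => p.2))
      (some ((pvCountUp fold_y (PySem.List.sorted coords (fun p => p.2)) : Nat) : Int)) none = D := by
    rw [hcount, PySem.List.slice_from_natCast, hsplit, List.drop_left]
  simp only [hup, hdown]
  -- up is nonempty under Pre_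
  obtain ⟨p, hp, hplt⟩ := hpre
  have hUne : U ≠ [] := by
    rw [hU, Ne, PySem.List.sorted_eq_nil_iff]
    intro hnil
    have : p ∈ coords.filter (fun q => decide (q.2 < fold_y)) :=
      List.mem_filter.2 ⟨hp, by simpa using hplt⟩
    rw [hnil] at this; simp at this
  rw [PySem.List.pyGet?_neg_one, List.getLast?_eq_some_getLast hUne]
  -- identical option scrutinee on both sides
  set m := U.getLast hUne with hm
  have hmU : m ∈ U := List.getLast_mem hUne
  have hmlt : m.2 < fold_y := hUmem m hmU
  dsimp only
  rw [PySem.List.foldl_congr_mem D _ (fun acc p => acc ++ [(p.1, p.2 - m.2)]) U (by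
    intro acc x hx
    have hxge : ¬ x.2 < fold_y := hDmem x hx
    have h1 : |x.2 - m.2| = x.2 - m.2 := abs_of_pos (by omega)
    rw [h1, if_neg (by rintro ⟨-, h⟩; omega)])]
  rw [PySem.List.foldl_append_singleton_eq_map]
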